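-- pv_equiv track=rewrite | github.com/allenai/faithful-nmn | lib/dataset_readers/reader_utils.py | annotation_to_lisp_exp
-- ===== SOURCE A (Python) =====
-- def annotation_to_lisp_exp(annotation: str) -> str:
--     # TODO: Remove this hard-coded fix
--     annotation = annotation.replace("and\n", "bool_and\n")
--     annotation = annotation.replace("or\n", "bool_or\n")
--
--     expressions = annotation.split("\n")
--     output_depth = 0
--     output = []
--
--     def count_depth(exp: str):
--         """count the depth of this expression. Every dot in the prefix symbols a depth entry."""
--         return len(exp) - len(exp.lstrip("."))
--
--     def strip_attention(exp: str):
--         """remove the [attention] part of the expression"""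
--         if "[" in exp:
--             return exp[: exp.index("[")]
--         else:
--             return exp
--
--     for i, exp in enumerate(expressions):
--         depth = count_depth(exp)
--         if i + 1 < len(expressions):
--             next_expression_depth = count_depth(expressions[i + 1])
--         else:
--             next_expression_depth = 0
--
--         output.append("(")
--
--         exp = strip_attention(exp)
--         exp = exp.lstrip(".")
--         output.append(exp)
--
--         if next_expression_depth <= depth:
--             # current clause should be closed
--             output.append(")")
--
--         while next_expression_depth < depth:
--             # close until currently opened depth
--             output.append(")")
--             depth -= 1
--
--         output_depth = depth
--
--     while 0 < output_depth:
--         output.append(")")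
--         output_depth -= 1
--
--     # now make sure there's no one-expression in a parentheses (e.g. "(exist (find))" which should be "(exist find)")
--     i = 0
--     new_output = []
--     while i < len(output):
--         exp = output[i]
--         if i + 2 >= len(output):
--             new_output.append(exp)
--             i += 1
--             continue
--
--         exp1 = output[i + 1]
--         exp2 = output[i + 2]
--
--         if exp == "(" and exp1 not in ["(", ")"] and exp2 == ")":
--             new_output.append(exp1)
--             i += 2
--         else:
--             new_output.append(exp)
--
--         i += 1
--
--     output = " ".join(new_output)
--     output = output.replace("( ", "(")
--     output = output.replace(" )", ")")
--     return output
-- ===== SOURCE B (Python) =====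
-- def annotation_to_lisp_exp(annotation: str) -> str:
--     annotation = annotation.replace("and\n", "bool_and\n")
--     annotation = annotation.replace("or\n", "bool_or\n")
--     lines = annotation.split("\n")
--
--     def depth_of(s: str) -> int:
--         return len(s) - len(s.lstrip("."))
--
--     def atom_of(s: str) -> str:
--         if "[" in s:
--             s = s[: s.index("[")]
--         return s.lstrip(".")
--
--     depths = [depth_of(l) for l in lines]
--     nexts = depths[1:] + [0]
--
--     tokens = []
--     for line, d, nd in zip(lines, depths, nexts):
--         atom = atom_of(line)
--         if nd <= d:
--             tokens += [atom] + [")"] * (d - nd)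
--         else:
--             tokens += ["(", atom]
--
--     out = " ".join(tokens)
--     out = out.replace("( ", "(")
--     out = out.replace(" )", ")")
--     return out
-- ===== Notes on version B (the rewrite author's own statement) =====
-- stated objective: simpler
-- what changed: A's stateful multi-pass pipeline (lookahead loop with an output_depth state, two closing while-loops, then a separate index-skipping collapse pass over the token list) is replaced by a single pass that emits a closed-form, already-collapsed token group per line from the (depth, next-depth) pair; Pre_ excludes degenerate annotations where some line strips to a bare '(' or ')' atom, on which A's collapse-pass guard produces an accidental token arrangement.
-- outside the precondition, e.g. on annotation_to_lisp_exp('('): A returns '(()', B returns '('; on annotation_to_lisp_exp('a\n.('): A returns '(a (())', B returns '(a ()'; on annotation_to_lisp_exp(')'): A returns '())', B returns ')'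
import Mathlib
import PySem

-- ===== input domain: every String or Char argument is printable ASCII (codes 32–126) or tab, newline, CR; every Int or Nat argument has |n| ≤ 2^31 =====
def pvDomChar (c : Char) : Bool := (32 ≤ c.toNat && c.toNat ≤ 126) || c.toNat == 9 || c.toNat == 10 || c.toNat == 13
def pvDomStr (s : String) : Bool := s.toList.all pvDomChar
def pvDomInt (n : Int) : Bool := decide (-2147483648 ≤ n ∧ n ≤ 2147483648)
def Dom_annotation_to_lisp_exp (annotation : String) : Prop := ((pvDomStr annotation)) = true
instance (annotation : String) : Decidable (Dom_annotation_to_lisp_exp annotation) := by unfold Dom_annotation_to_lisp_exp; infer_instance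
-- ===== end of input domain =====

-- B replaces A's stateful multi-pass token machine (lookahead loop, depth while-loops and a
-- separate collapse pass) by a single pass emitting the token group of each line directly from
-- its (depth, next-depth) pair; same return value on Pre_, no speed claim.

-- ===== PORT A =====

-- count_depth: len(exp) - len(exp.lstrip(".")); lstrip(".") ported by hand as
-- dropWhile (· == '.'), exact for this one-character strip set.
def pvCountDepth (exp : List Char) : Nat :=
  exp.length - (exp.dropWhile (· == '.')).length

-- strip_attention: exp[:exp.index("[")] when "[" in exp (index = find on a present substring).
def pvStripAttention (exp : List Char) : List Char :=
  if PySem.Chars.isIn ['['] exp then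
    PySem.Chars.slice exp none (some (PySem.Chars.find exp ['[']))
  else exp

-- next_expression_depth: count_depth(expressions[i+1]) when i+1 < len, else 0
-- (= head of the remaining list in the structural recursion below).
def pvNextDepth : List (List Char) → Nat
  | [] => 0
  | e :: _ => pvCountDepth e

-- the inner 'while next_expression_depth < depth' loop: emitted ")" tokens and final depth.
def pvCloseWhile (nextDepth : Nat) : Nat → List (List Char) × Nat
  | 0 => ([], 0)
  | d + 1 =>
    if nextDepth < d + 1 then
      let r := pvCloseWhile nextDepth d
      ([')'] :: r.1, r.2)
    else ([], d + 1)

-- the main 'for i, exp in enumerate(expressions)' loop; state = (output, output_depth).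
def pvLoopA (acc : List (List Char)) (od : Nat) : List (List Char) → List (List Char) × Nat
  | [] => (acc, od)
  | exp :: rest =>
    let depth := pvCountDepth exp
    let nextDepth := pvNextDepth rest
    let acc1 := acc ++ [['(']]
    let exp1 := pvStripAttention exp
    let exp2 := exp1.dropWhile (· == '.')
    let acc2 := acc1 ++ [exp2]
    let acc3 := if nextDepth ≤ depth then acc2 ++ [[')']] else acc2
    let r := pvCloseWhile nextDepth depth
    pvLoopA (acc3 ++ r.1) r.2 rest

-- the trailing 'while 0 < output_depth' loop.
def pvFinalClose : Nat → List (List Char)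
  | 0 => []
  | d + 1 => [')'] :: pvFinalClose d

-- the collapse pass over the token list (index i, skipping 3 tokens on a collapse).
def pvCollapse : List (List Char) → List (List Char)
  | a :: b :: c :: rest =>
    if a = ['('] ∧ b ≠ ['('] ∧ b ≠ [')'] ∧ c = [')'] then
      b :: pvCollapse rest
    else
      a :: pvCollapse (b :: c :: rest)
  | l => l

def annotation_to_lisp_exp (annotation : String) : String :=
  let ann := PySem.Str.replace annotation "and\n" "bool_and\n"
  let ann2 := PySem.Str.replace ann "or\n" "bool_or\n"
  let expressions := PySem.Chars.splitOn ann2.toList ['\n']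
  let r := pvLoopA [] 0 expressions
  let output := r.1 ++ pvFinalClose r.2
  let newOutput := pvCollapse output
  let out := PySem.Chars.join [' '] newOutput
  let out2 := PySem.Chars.replace out ['(', ' '] ['(']
  let out3 := PySem.Chars.replace out2 [' ', ')'] [')']
  String.ofList out3

-- ===== PORT B =====

def pvDepthOf (s : List Char) : Nat :=
  s.length - (s.dropWhile (· == '.')).length

def pvAtomOf (s : List Char) : List Char :=
  (if PySem.Chars.isIn ['['] s then
     PySem.Chars.slice s none (some (PySem.Chars.find s ['[']))
   else s).dropWhile (· == '.')

-- the per-line token group of B's single pass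
def pvPiece (line : List Char) (d nd : Nat) : List (List Char) :=
  if nd ≤ d then [pvAtomOf line] ++ List.replicate (d - nd) [')']
  else [['('], pvAtomOf line]

def annotation_to_lisp_exp_alt (annotation : String) : String :=
  let ann := PySem.Str.replace annotation "and\n" "bool_and\n"
  let ann2 := PySem.Str.replace ann "or\n" "bool_or\n"
  let lines := PySem.Chars.splitOn ann2.toList ['\n']
  let depths := lines.map pvDepthOf
  let nexts := PySem.List.slice depths (some 1) none ++ [0]
  let toks := (lines.zip (depths.zip nexts)).flatMap (fun p => pvPiece p.1 p.2.1 p.2.2)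
  let out := PySem.Chars.join [' '] toks
  let out2 := PySem.Chars.replace out ['(', ' '] ['(']
  let out3 := PySem.Chars.replace out2 [' ', ')'] [')']
  String.ofList out3

-- ===== PRECONDITION & SPEC =====
-- Pre_ excludes the degenerate annotations in which some line strips to a bare "(" or ")" atom:
-- there A's collapse pass is guarded against the atom looking like a parenthesis token and its
-- output on such lines is an accident of its token representation, a corner no caller would
-- specify; B just emits the atom. (A condition on the split lines of the input after the two
-- fixed substring replaces — no algorithm is re-run.)
def Pre_annotation_to_lisp_exp (annotation : String) : Prop :=
  ∀ l ∈ PySem.Chars.splitOn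
      (PySem.Str.replace (PySem.Str.replace annotation "and\n" "bool_and\n")
        "or\n" "bool_or\n").toList ['\n'],
    pvAtomOf l ≠ ['('] ∧ pvAtomOf l ≠ [')']
instance (annotation : String) : Decidable (Pre_annotation_to_lisp_exp annotation) := by
  unfold Pre_annotation_to_lisp_exp; infer_instance

def pvWitness_annotation_to_lisp_exp : String := "exist\n.find"

def Spec_annotation_to_lisp_exp (annotation : String) (out : String) : Prop := out = annotation_to_lisp_exp_alt annotation
instance (annotation : String) (out : String) : Decidable (Spec_annotation_to_lisp_exp annotation out) := by unfold Spec_annotation_to_lisp_exp; infer_instance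

-- ===== CLAIM (what is proved, stated in full; the proofs are below) =====
def Claim_equal_annotation_to_lisp_exp : Prop := ∀ (annotation : String), Dom_annotation_to_lisp_exp annotation → Pre_annotation_to_lisp_exp annotation → Spec_annotation_to_lisp_exp annotation (annotation_to_lisp_exp annotation)

-- ===== LEMMAS AND PROOFS =====

-- A's token stream per line: one "(" token, the atom, the conditional ")" and the while-loop closes.
def pvGroupsA : List (List Char) → List (List Char)
  | [] => []
  | e :: rest =>
    ([['('], (pvStripAttention e).dropWhile (· == '.')]
      ++ (if pvNextDepth rest ≤ pvCountDepth e then [[')']] else [])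
      ++ List.replicate (pvCountDepth e - pvNextDepth rest) [')'])
      ++ pvGroupsA rest

-- B's token stream in the same recursive shape.
def pvGroupsB : List (List Char) → List (List Char)
  | [] => []
  | e :: rest => pvPiece e (pvCountDepth e) (pvNextDepth rest) ++ pvGroupsB rest

lemma pvAtomOf_eq (s : List Char) :
    pvAtomOf s = (pvStripAttention s).dropWhile (· == '.') := rfl

lemma pvDepthOf_eq (s : List Char) : pvDepthOf s = pvCountDepth s := rfl

lemma pvCloseWhile_eq (nd : Nat) :
    ∀ d, pvCloseWhile nd d = (List.replicate (d - nd) [')'], min nd d) := by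
  intro d
  induction d with
  | zero => simp [pvCloseWhile]
  | succ d ih =>
    by_cases h : nd < d + 1
    · have h1 : d + 1 - nd = (d - nd) + 1 := by omega
      have h2 : min nd (d + 1) = min nd d := by omega
      simp [pvCloseWhile, h, ih, h1, h2, List.replicate_succ]
    · have h1 : d + 1 - nd = 0 := by omega
      have h2 : min nd (d + 1) = d + 1 := by omega
      simp [pvCloseWhile, h, h1, h2]

lemma pvLoopA_eq : ∀ (lines : List (List Char)) (acc : List (List Char)) (od : Nat),
    pvLoopA acc od lines = (acc ++ pvGroupsA lines, if lines = [] then od else 0) := by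
  intro lines
  induction lines with
  | nil => intro acc od; simp [pvLoopA, pvGroupsA]
  | cons e rest ih =>
    intro acc od
    simp only [pvLoopA, pvCloseWhile_eq, ih, pvGroupsA]
    simp only [Prod.mk.injEq]
    constructor
    · by_cases h : pvNextDepth rest ≤ pvCountDepth e <;>
        simp [h, List.append_assoc]
    · cases rest with
      | nil => simp [pvNextDepth]
      | cons f t => simp

lemma pvCollapse_triple_not {a b c : List Char} {l : List (List Char)}
    (h : ¬(a = ['('] ∧ b ≠ ['('] ∧ b ≠ [')'] ∧ c = [')'])) :
    pvCollapse (a :: b :: c :: l) = a :: pvCollapse (b :: c :: l) := by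
  simp only [pvCollapse]
  rw [if_neg h]

lemma pvCollapse_collapse {b : List Char} {l : List (List Char)}
    (h1 : b ≠ ['(']) (h2 : b ≠ [')']) :
    pvCollapse (['('] :: b :: [')'] :: l) = b :: pvCollapse l := by
  simp [pvCollapse, h1, h2]

lemma pvCollapse_cons_not_open {a : List Char} {l : List (List Char)} (h : a ≠ ['(']) :
    pvCollapse (a :: l) = a :: pvCollapse l := by
  match l with
  | [] => rfl
  | [b] => rfl
  | b :: c :: t =>
    rw [pvCollapse_triple_not]
    intro hc
    exact h hc.1

lemma pvCollapse_rep_close (k : Nat) (l : List (List Char)) :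
    pvCollapse (List.replicate k [')'] ++ l) = List.replicate k [')'] ++ pvCollapse l := by
  induction k with
  | zero => simp
  | succ k ih =>
    rw [List.replicate_succ, List.cons_append,
      pvCollapse_cons_not_open (by decide), ih]
    simp

lemma pvCollapse_groups : ∀ lines : List (List Char),
    (∀ l ∈ lines, pvAtomOf l ≠ ['('] ∧ pvAtomOf l ≠ [')']) →
    pvCollapse (pvGroupsA lines) = pvGroupsB lines := by
  intro lines
  induction lines with
  | nil => intro _; rfl
  | cons e rest ih =>
    intro hpre
    have he := hpre e (by simp)
    have hrest : ∀ l ∈ rest, pvAtomOf l ≠ ['('] ∧ pvAtomOf l ≠ [')'] :=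
      fun l hl => hpre l (by simp [hl])
    simp only [pvGroupsA, pvGroupsB, pvPiece]
    rw [← pvAtomOf_eq]
    by_cases hle : pvNextDepth rest ≤ pvCountDepth e
    · rw [if_pos hle, if_pos hle]
      have shape : ([['('], pvAtomOf e] ++ [[')']]
            ++ List.replicate (pvCountDepth e - pvNextDepth rest) [')']) ++ pvGroupsA rest
          = ['('] :: pvAtomOf e :: [')']
            :: (List.replicate (pvCountDepth e - pvNextDepth rest) [')'] ++ pvGroupsA rest) := by
        simp
      rw [shape, pvCollapse_collapse he.1 he.2, pvCollapse_rep_close, ih hrest]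
      simp
    · rw [if_neg hle, if_neg hle]
      cases rest with
      | nil => simp [pvNextDepth] at hle
      | cons f t =>
        obtain ⟨X, hX⟩ : ∃ X, pvGroupsA (f :: t) = ['('] :: X :=
          ⟨((pvStripAttention f).dropWhile (· == '.')) ::
            ((if pvNextDepth t ≤ pvCountDepth f then [[')']] else [])
              ++ (List.replicate (pvCountDepth f - pvNextDepth t) [')'] ++ pvGroupsA t)), by
            simp [pvGroupsA]⟩
        have hrep : pvCountDepth e - pvNextDepth (f :: t) = 0 := by omega
        rw [hrep, hX]
        simp only [List.replicate_zero, List.append_nil, List.cons_append, List.nil_append]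
        rw [pvCollapse_triple_not (by rintro ⟨-, -, -, hc⟩; exact absurd hc (by decide)),
          pvCollapse_cons_not_open he.1, ← hX, ih hrest]

lemma pvZip_eq : ∀ lines : List (List Char),
    (lines.zip ((lines.map pvDepthOf).zip ((lines.map pvDepthOf).tail ++ [0]))).flatMap
        (fun p => pvPiece p.1 p.2.1 p.2.2)
      = pvGroupsB lines := by
  intro lines
  induction lines with
  | nil => rfl
  | cons e rest ih =>
    cases rest with
    | nil => simp [pvGroupsB, pvNextDepth, pvDepthOf_eq]
    | cons f t =>
      simp only [List.map_cons, List.tail_cons, List.cons_append, List.zip_cons_cons,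
        List.flatMap_cons] at ih ⊢
      rw [ih]
      simp [pvGroupsB, pvNextDepth, pvDepthOf_eq]

lemma pvTokens_eq (lines : List (List Char))
    (hpre : ∀ l ∈ lines, pvAtomOf l ≠ ['('] ∧ pvAtomOf l ≠ [')']) :
    pvCollapse ((pvLoopA [] 0 lines).1 ++ pvFinalClose (pvLoopA [] 0 lines).2)
      = (lines.zip ((lines.map pvDepthOf).zip ((lines.map pvDepthOf).tail ++ [0]))).flatMap
          (fun p => pvPiece p.1 p.2.1 p.2.2) := by
  rw [pvLoopA_eq, pvZip_eq]
  simp only [ite_self, List.nil_append]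
  show pvCollapse (pvGroupsA lines ++ pvFinalClose 0) = _
  simp only [pvFinalClose, List.append_nil]
  exact pvCollapse_groups lines hpre

-- ===== VERDICT (by name: the statement is the Claim_ definition above) =====
theorem annotation_to_lisp_exp_spec : Claim_equal_annotation_to_lisp_exp := by
  intro annotation _ hpre
  unfold Spec_annotation_to_lisp_exp
  unfold Pre_annotation_to_lisp_exp at hpre
  simp only [annotation_to_lisp_exp, annotation_to_lisp_exp_alt, PySem.List.slice_from_one]
  rw [pvTokens_eq _ hpre]
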